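-- pv_equiv track=rewrite | github.com/rani-maklada/Search-Algorithms | search_algorithms.py | remove_states
-- ===== SOURCE A (Python) =====
-- def remove_states(popped_states, visited_states):
--     popped_states_to_del = []
--     visited_states_to_del = []
--     for key in popped_states:
--         if key in visited_states:
--             if popped_states[key]['score'] < visited_states[key]['score']:
--                 visited_states_to_del.append(key)
--             else:
--                 popped_states_to_del.append(key)
--
--     for state_key in visited_states_to_del:
--         del visited_states[state_key]
--
--     for state_key in popped_states_to_del:
--         del popped_states[state_key]
--
--     return [popped_states, visited_states]
-- ===== SOURCE B (Python) =====
-- # B: no deletion at all — rebuild each dict in one comprehension with a keep-predicate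
-- # (an entry survives iff its key is absent from the other dict or it wins the score
-- # comparison). Unlike A, B does not mutate its arguments; it returns fresh dicts with
-- # the same contents (equivalence is about the return value).
-- def remove_states(popped_states, visited_states):
--     kept_popped = {k: v for k, v in popped_states.items()
--                    if k not in visited_states or v['score'] < visited_states[k]['score']}
--     kept_visited = {k: v for k, v in visited_states.items()
--                     if k not in popped_states or popped_states[k]['score'] >= v['score']}
--     return [kept_popped, kept_visited]
-- ===== Notes on version B (the rewrite author's own statement) =====
-- stated objective: simpler
-- what changed: B performs no deletion at all: instead of collecting to-delete lists and erasing from the input dicts, it rebuilds each dict in a single comprehension with a direct keep-predicate (entry survives iff its key is absent from the other dict or it wins the score comparison); B returns fresh dicts rather than mutating the arguments.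
-- outside the precondition, e.g. on remove_states({'a': {}}, {'a': {}}): A raises KeyError, B raises KeyError
import Mathlib
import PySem

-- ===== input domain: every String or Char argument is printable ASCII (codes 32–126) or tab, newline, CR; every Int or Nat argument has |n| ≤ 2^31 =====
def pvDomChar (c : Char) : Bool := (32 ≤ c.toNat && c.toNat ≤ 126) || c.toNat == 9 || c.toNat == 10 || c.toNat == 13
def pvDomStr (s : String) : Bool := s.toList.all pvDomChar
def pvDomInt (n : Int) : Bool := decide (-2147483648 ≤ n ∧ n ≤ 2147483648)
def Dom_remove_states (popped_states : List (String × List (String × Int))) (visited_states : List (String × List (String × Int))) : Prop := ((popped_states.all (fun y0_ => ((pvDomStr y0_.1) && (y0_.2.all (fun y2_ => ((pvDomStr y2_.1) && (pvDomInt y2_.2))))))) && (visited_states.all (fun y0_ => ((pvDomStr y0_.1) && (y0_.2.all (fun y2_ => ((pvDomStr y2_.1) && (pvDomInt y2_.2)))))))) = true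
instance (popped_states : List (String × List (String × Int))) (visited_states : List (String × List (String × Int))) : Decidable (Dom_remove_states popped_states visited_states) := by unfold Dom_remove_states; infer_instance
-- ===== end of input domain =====

-- B rebuilds each dict in one comprehension with a direct keep-predicate instead of A's
-- to-delete lists plus erase loops (objective: simpler). A mutates its argument dicts in
-- place and returns them; B returns fresh dicts with the same contents — the theorems are
-- about the returned value.

-- ===== PORT A =====
-- d['score'] of a value dict (Pre_ guarantees 'score' is present where A reads it)
def pvScore (val : List (String × Int)) : Int :=
  PySem.Dict.getD (PySem.Dict.mk val) "score" 0

def remove_states (popped_states : List (String × List (String × Int))) (visited_states : List (String × List (String × Int))) : List (List (String × List (String × Int))) :=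
  let P := PySem.Dict.mk popped_states
  let V := PySem.Dict.mk visited_states
  -- for key in popped_states: … building the two to-delete lists
  let dels := (PySem.Dict.keys P).foldl
    (fun (acc : List String × List String) key =>
      if PySem.Dict.contains V key then
        if pvScore (PySem.Dict.getD P key []) < pvScore (PySem.Dict.getD V key []) then
          (acc.1, acc.2 ++ [key])
        else
          (acc.1 ++ [key], acc.2)
      else acc) ([], [])
  -- for state_key in visited_states_to_del: del visited_states[state_key]
  let V2 := dels.2.foldl (fun d k => PySem.Dict.erase d k) V
  -- for state_key in popped_states_to_del: del popped_states[state_key]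
  let P2 := dels.1.foldl (fun d k => PySem.Dict.erase d k) P
  [PySem.Dict.items P2, PySem.Dict.items V2]

-- ===== PORT B =====
def remove_states_alt (popped_states : List (String × List (String × Int))) (visited_states : List (String × List (String × Int))) : List (List (String × List (String × Int))) :=
  let P := PySem.Dict.mk popped_states
  let V := PySem.Dict.mk visited_states
  -- {k: v for k, v in popped_states.items() if k not in visited_states or v['score'] < visited_states[k]['score']}
  let keptP := PySem.Dict.mk ((PySem.Dict.items P).filter
    (fun kv => !PySem.Dict.contains V kv.1
               || decide (pvScore kv.2 < pvScore (PySem.Dict.getD V kv.1 []))))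
  -- {k: v for k, v in visited_states.items() if k not in popped_states or popped_states[k]['score'] >= v['score']}
  let keptV := PySem.Dict.mk ((PySem.Dict.items V).filter
    (fun kv => !PySem.Dict.contains P kv.1
               || decide (pvScore (PySem.Dict.getD P kv.1 []) ≥ pvScore kv.2)))
  [PySem.Dict.items keptP, PySem.Dict.items keptV]

-- ===== PRECONDITION & SPEC =====
-- Pre_ excludes (a) inputs where A raises KeyError ('score' missing from a value dict of a
-- key present in both dicts), and (b) association lists with duplicate keys (outer or inner),
-- which do not faithfully represent any Python dict argument (the dict collapses duplicates).
def Pre_remove_states (popped_states : List (String × List (String × Int))) (visited_states : List (String × List (String × Int))) : Prop :=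
  (popped_states.map Prod.fst).Nodup ∧ (visited_states.map Prod.fst).Nodup ∧
  (∀ kv ∈ popped_states, (kv.2.map Prod.fst).Nodup) ∧
  (∀ kv ∈ visited_states, (kv.2.map Prod.fst).Nodup) ∧
  (∀ kv ∈ popped_states, ∀ kw ∈ visited_states, kv.1 = kw.1 →
    ("score" ∈ kv.2.map Prod.fst ∧ "score" ∈ kw.2.map Prod.fst))
instance (popped_states : List (String × List (String × Int))) (visited_states : List (String × List (String × Int))) : Decidable (Pre_remove_states popped_states visited_states) := by unfold Pre_remove_states; infer_instance

def pvWitness_remove_states : (List (String × List (String × Int))) × (List (String × List (String × Int))) :=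
  ([("a", [("score", 1)]), ("b", [("score", 4)])], [("a", [("score", 2)]), ("c", [("score", 0)])])

def Spec_remove_states (popped_states : List (String × List (String × Int))) (visited_states : List (String × List (String × Int))) (out : List (List (String × List (String × Int)))) : Prop := out = remove_states_alt popped_states visited_states
instance (popped_states : List (String × List (String × Int))) (visited_states : List (String × List (String × Int))) (out : List (List (String × List (String × Int)))) : Decidable (Spec_remove_states popped_states visited_states out) := by unfold Spec_remove_states; infer_instance

-- ===== CLAIM (what is proved, stated in full; the proofs are below) =====
def Claim_equal_remove_states : Prop := ∀ (popped_states : List (String × List (String × Int))) (visited_states : List (String × List (String × Int))), Dom_remove_states popped_states visited_states → Pre_remove_states popped_states visited_states → Spec_remove_states popped_states visited_states (remove_states popped_states visited_states)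

-- ===== LEMMAS AND PROOFS =====

-- A's accumulator loop produces exactly the two filtered key lists
theorem pvFoldA (c : String → Bool) (f g : String → Int) :
    ∀ (ks : List String) (a b : List String),
    ks.foldl
      (fun (acc : List String × List String) key =>
        if c key then
          if f key < g key then (acc.1, acc.2 ++ [key]) else (acc.1 ++ [key], acc.2)
        else acc) (a, b)
    = (a ++ ks.filter (fun k => c k && !decide (f k < g k)),
       b ++ ks.filter (fun k => c k && decide (f k < g k))) := by
  intro ks
  induction ks with
  | nil => intro a b; simp
  | cons hd tl ih =>
      intro a b
      simp only [List.foldl_cons, List.filter_cons]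
      by_cases hc : c hd
      · by_cases hf : f hd < g hd
        · simpa [hc, hf] using ih a (b ++ [hd])
        · simpa [hc, hf] using ih (a ++ [hd]) b
      · simp [hc, ih a b]

-- a fold of erases is one filter of the items by non-membership in the deleted keys
theorem pvItems_foldl_erase {ν : Type} :
    ∀ (ks : List String) (d : PySem.Dict String ν),
    PySem.Dict.items (ks.foldl (fun d k => PySem.Dict.erase d k) d)
      = (PySem.Dict.items d).filter (fun kv => decide (kv.1 ∉ ks)) := by
  intro ks
  induction ks with
  | nil => intro d; simp
  | cons hd tl ih =>
      intro d
      rw [List.foldl_cons, ih]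
      obtain ⟨items⟩ := d
      simp only [PySem.Dict.erase, List.filter_filter]
      apply List.filter_congr
      intro kv _
      by_cases h : kv.1 = hd <;> simp [h]

-- ===== VERDICT (by name: the statement is the Claim_ definition above) =====
theorem remove_states_spec : Claim_equal_remove_states := by
  intro p v _ hpre
  unfold Spec_remove_states remove_states remove_states_alt
  dsimp only
  rw [pvFoldA (fun k => PySem.Dict.contains (PySem.Dict.mk v) k)
        (fun k => pvScore (PySem.Dict.getD (PySem.Dict.mk p) k []))
        (fun k => pvScore (PySem.Dict.getD (PySem.Dict.mk v) k []))]
  simp only [List.nil_append]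
  rw [pvItems_foldl_erase, pvItems_foldl_erase]
  have hP : (PySem.Dict.mk p).keys.Nodup := by
    simpa [PySem.Dict.keys, PySem.Dict.mk, PySem.Dict.items] using hpre.1
  have hV : (PySem.Dict.mk v).keys.Nodup := by
    simpa [PySem.Dict.keys, PySem.Dict.mk, PySem.Dict.items] using hpre.2.1
  simp only [List.cons.injEq, and_true]
  constructor
  · -- popped side
    show (PySem.Dict.items (PySem.Dict.mk p)).filter _
        = PySem.Dict.items (PySem.Dict.mk ((PySem.Dict.items (PySem.Dict.mk p)).filter _))
    apply List.filter_congr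
    intro kv hkv
    have hget : PySem.Dict.getD (PySem.Dict.mk p) kv.1 [] = kv.2 :=
      PySem.Dict.getD_of_mem_items (PySem.Dict.mk p) (by simpa using hkv) hP []
    have hmemk : kv.1 ∈ (PySem.Dict.mk p).keys := List.mem_map_of_mem hkv
    by_cases hc : PySem.Dict.contains (PySem.Dict.mk v) kv.1
    · by_cases hf : pvScore kv.2 < pvScore (PySem.Dict.getD (PySem.Dict.mk v) kv.1 [])
      · simp [List.mem_filter, hget, hc, hf]
      · simp only [List.mem_filter, hget, hc, hf]
        simp
        exact ⟨kv.2, by simpa using hkv⟩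
    · simp only [List.mem_filter, hc]
      simp
  · -- visited side
    show (PySem.Dict.items (PySem.Dict.mk v)).filter _
        = PySem.Dict.items (PySem.Dict.mk ((PySem.Dict.items (PySem.Dict.mk v)).filter _))
    apply List.filter_congr
    intro kw hkw
    have hget : PySem.Dict.getD (PySem.Dict.mk v) kw.1 [] = kw.2 :=
      PySem.Dict.getD_of_mem_items (PySem.Dict.mk v) (by simpa using hkw) hV []
    have hcV : PySem.Dict.contains (PySem.Dict.mk v) kw.1 = true := by
      rw [PySem.Dict.contains_eq_decide_mem_keys]
      exact decide_eq_true (List.mem_map_of_mem hkw)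
    by_cases hm : PySem.Dict.contains (PySem.Dict.mk p) kw.1
    · have hmk : kw.1 ∈ (PySem.Dict.mk p).keys := by
        have := hm
        rw [PySem.Dict.contains_eq_decide_mem_keys] at this
        exact of_decide_eq_true this
      have hany : (v.any fun q => q.1 == kw.1) = true := by simpa using hcV
      have hanyP : (p.any fun q => q.1 == kw.1) = true := by simpa using hm
      have hmk' : kw.1 ∈ List.map (fun x => x.1) p := hmk
      by_cases hf : pvScore (PySem.Dict.getD (PySem.Dict.mk p) kw.1 []) < pvScore kw.2
      · simp [List.mem_filter, hget, hany, hanyP, hf, hmk', not_le.mpr hf]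
      · simp [List.mem_filter, hget, hany, hanyP, hf, hmk', not_lt.mp hf]
    · have hnk : kw.1 ∉ (PySem.Dict.mk p).keys := by
        intro hmem
        rw [PySem.Dict.contains_eq_decide_mem_keys] at hm
        exact (of_decide_eq_false (Bool.not_eq_true _ ▸ (by simpa using hm)) : _) hmem
      simp [List.mem_filter, hm]
      intro x hx
      exact absurd (List.mem_map_of_mem hx) hnk
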